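-- pv_equiv track=rewrite | github.com/tmiyano89/context-engineering | context-template/scripts/updator.py | find_section_indices
-- ===== SOURCE A (Python) =====
-- def find_section_indices(markdown, heading):
--     """セクションの開始・終了位置を取得"""
--     lines = markdown.split('\n')
--     start = -1
--
--     # 見出しを検索（# レベルまで含む）
--     for i, line in enumerate(lines):
--         if line.strip().startswith('#') and heading in line:
--             start = i
--             break
--
--     if start == -1:
--         return None
--
--     # 次の同レベル以下の見出しを探す
--     current_level = len(lines[start]) - len(lines[start].lstrip('#'))
--     end = len(lines)
--
--     for i in range(start + 1, len(lines)):
--         if lines[i].strip().startswith('#'):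
--             level = len(lines[i]) - len(lines[i].lstrip('#'))
--             if level <= current_level:
--                 end = i
--                 break
--
--     return {"start": start, "end": end}
-- ===== SOURCE B (Python) =====
-- def find_section_indices(markdown, heading):
--     """セクションの開始・終了位置を取得 (heading-table re-implementation)"""
--     lines = markdown.split('\n')
--
--     # one pass: table of heading records (index, level, raw line)
--     heads = []
--     for i, line in enumerate(lines):
--         if line.strip().startswith('#'):
--             level = 0
--             while level < len(line) and line[level] == '#':
--                 level += 1
--             heads.append((i, level, line))
--
--     # scan the table for the first record containing the heading
--     for k, (i, level, line) in enumerate(heads):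
--         if heading in line:
--             end = len(lines)
--             for (j, level2, _) in heads[k + 1:]:
--                 if level2 <= level:
--                     end = j
--                     break
--             return {"start": i, "end": end}
--     return None
-- ===== Notes on version B (the rewrite author's own statement) =====
-- stated objective: alternative
-- what changed: B first builds a table of heading records (index, level, raw line) in one pass and then answers both the start search and the end search by scanning that table, instead of A's two raw-line scans with index arithmetic over the full line list; the level is counted by a character walk rather than A's len-minus-lstrip subtraction.
import Mathlib
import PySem

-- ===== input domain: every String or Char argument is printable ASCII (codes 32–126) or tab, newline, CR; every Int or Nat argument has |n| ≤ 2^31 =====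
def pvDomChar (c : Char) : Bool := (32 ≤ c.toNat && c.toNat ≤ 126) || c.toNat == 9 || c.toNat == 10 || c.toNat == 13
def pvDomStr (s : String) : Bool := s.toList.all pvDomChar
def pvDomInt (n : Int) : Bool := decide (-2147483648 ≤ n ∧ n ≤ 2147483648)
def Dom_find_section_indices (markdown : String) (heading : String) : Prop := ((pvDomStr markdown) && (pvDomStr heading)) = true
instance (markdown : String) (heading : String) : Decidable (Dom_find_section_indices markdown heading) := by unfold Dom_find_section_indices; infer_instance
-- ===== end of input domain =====

-- B re-implements A via a one-pass heading table that both the start and the end search then scan ('alternative'; same asymptotic cost).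

-- Python's `line.strip().startswith('#')` (identical expression in both sources)
def pvIsHead (l : List Char) : Bool := PySem.Chars.startswith (PySem.Chars.strip l) ['#']

-- ===== PORT A =====
-- Python's `len(l) - len(l.lstrip('#'))`: lstrip('#') drops exactly the leading '#' characters, so dropWhile is exact here
def pvLevelA (l : List Char) : Nat := l.length - (l.dropWhile (· == '#')).length

-- A's first loop: first index whose line is a heading containing `heading`, else -1
def pvFindStartA (h : List Char) : List (Int × List Char) → Int
  | [] => -1
  | (i, line) :: rest =>
    if pvIsHead line && PySem.Chars.isIn h line then i else pvFindStartA h rest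

-- A's second loop over `range(start+1, len(lines))`; `i` always indexes in range, so pyGetD is exactly `lines[i]`
def pvFindEndA (lines : List (List Char)) (cur : Nat) : List Int → Int
  | [] => (lines.length : Int)
  | i :: rest =>
    let li := PySem.List.pyGetD lines i []
    if pvIsHead li then
      if pvLevelA li ≤ cur then i else pvFindEndA lines cur rest
    else pvFindEndA lines cur rest

def find_section_indices (markdown : String) (heading : String) : Option (List (String × Int)) :=
  let lines := PySem.Chars.splitOn markdown.toList ['\n']
  let start := pvFindStartA heading.toList (PySem.List.enumerate lines)
  if start = -1 then none
  else
    -- `lines[start]`: start was produced by the loop, hence a valid index, so pyGetD is exact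
    let cur := pvLevelA (PySem.List.pyGetD lines start [])
    some [("start", start),
          ("end", pvFindEndA lines cur (PySem.List.pyRange (start + 1) (lines.length : Int)))]

-- ===== PORT B =====
-- B's `while level < len(line) and line[level] == '#': level += 1` counter
def pvCountHash : List Char → Nat
  | [] => 0
  | c :: rest => if c == '#' then pvCountHash rest + 1 else 0

-- B's table-building pass: heading records (index, level, raw line)
def pvHeads : List (Int × List Char) → List (Int × Nat × List Char)
  | [] => []
  | (i, l) :: rest => if pvIsHead l then (i, pvCountHash l, l) :: pvHeads rest else pvHeads rest

-- B's end search over the tail of the table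
def pvEndB (dflt : Int) (lvl : Nat) : List (Int × Nat × List Char) → Int
  | [] => dflt
  | (j, l2, _) :: rest => if l2 ≤ lvl then j else pvEndB dflt lvl rest

-- B's start search over the table
def pvScanB (dflt : Int) (h : List Char) : List (Int × Nat × List Char) → Option (List (String × Int))
  | [] => none
  | (i, lvl, line) :: rest =>
    if PySem.Chars.isIn h line then some [("start", i), ("end", pvEndB dflt lvl rest)]
    else pvScanB dflt h rest

def find_section_indices_alt (markdown : String) (heading : String) : Option (List (String × Int)) :=
  let lines := PySem.Chars.splitOn markdown.toList ['\n']
  pvScanB (lines.length : Int) heading.toList (pvHeads (PySem.List.enumerate lines))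

-- ===== PRECONDITION & SPEC =====
def Spec_find_section_indices (markdown : String) (heading : String) (out : Option (List (String × Int))) : Prop := out = find_section_indices_alt markdown heading
instance (markdown : String) (heading : String) (out : Option (List (String × Int))) : Decidable (Spec_find_section_indices markdown heading out) := by unfold Spec_find_section_indices; infer_instance

-- ===== CLAIM (what is proved, stated in full; the proofs are below) =====
def Claim_equal_find_section_indices : Prop := ∀ (markdown : String) (heading : String), Dom_find_section_indices markdown heading → Spec_find_section_indices markdown heading (find_section_indices markdown heading)

-- ===== LEMMAS AND PROOFS =====

-- B's character-walk level equals A's len-minus-lstrip level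
lemma pvCountHash_eq_levelA (l : List Char) : pvCountHash l = pvLevelA l := by
  induction l with
  | nil => rfl
  | cons c rest ih =>
    by_cases hc : (c == '#') = true
    · have hle := List.length_dropWhile_le (fun x => x == '#') rest
      simp only [pvCountHash, pvLevelA, List.dropWhile, hc, if_true, List.length_cons] at *
      omega
    · simp only [pvCountHash, pvLevelA, List.dropWhile, hc, if_false, Bool.false_eq_true,
        List.length_cons]
      omega

-- A's end loop over range(k, len) equals B's end scan over the table built from the suffix from k
lemma pvEnd_eq (lines : List (List Char)) (cur : Nat) :
    ∀ (n k : Nat), lines.length - k = n → k ≤ lines.length →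
      pvFindEndA lines cur (PySem.List.pyRange (k : Int) (lines.length : Int)) =
      pvEndB (lines.length : Int) cur (pvHeads (PySem.List.enumerate (lines.drop k) (k : Int))) := by
  intro n
  induction n with
  | zero =>
    intro k hn hk
    have hk' : k = lines.length := by omega
    subst hk'
    simp [PySem.List.pyRange, PySem.List.enumerate_nil, List.drop_length, pvFindEndA, pvHeads, pvEndB]
  | succ n ih =>
    intro k hn hk
    have hklt : k < lines.length := by omega
    have hr : PySem.List.pyRange (k : Int) (lines.length : Int) =
        (k : Int) :: PySem.List.pyRange ((k : Int) + 1) (lines.length : Int) :=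
      PySem.List.pyRange_one_cons (by exact_mod_cast hklt)
    have hd : lines.drop k = lines[k] :: lines.drop (k + 1) := List.drop_eq_getElem_cons hklt
    have hget : PySem.List.pyGetD lines (k : Int) [] = lines[k] := by
      rw [PySem.List.pyGetD_natCast, List.getD_eq_getElem _ _ hklt]
    have hcast : ((k : Int) + 1) = ((k + 1 : Nat) : Int) := by push_cast; ring
    have ih' := ih (k + 1) (by omega) (by omega)
    rw [hr, hd, PySem.List.enumerate_cons]
    by_cases hH : pvIsHead lines[k]
    · by_cases hlvl : pvLevelA lines[k] ≤ cur
      · simp [pvFindEndA, pvHeads, pvEndB, hget, hH, hlvl, pvCountHash_eq_levelA]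
      · simp only [pvFindEndA, pvHeads, pvEndB, hget, hH, hlvl, if_true, if_false,
          pvCountHash_eq_levelA, if_neg hlvl, hcast]
        exact ih'
    · simp only [pvFindEndA, pvHeads, hget, hH, if_false, Bool.false_eq_true, hcast]
      exact ih'

-- the whole of A from position k equals B's scan of the table built from the suffix from k
lemma pvMain_eq (lines : List (List Char)) (h : List Char) :
    ∀ (n k : Nat), lines.length - k = n → k ≤ lines.length →
      (let start := pvFindStartA h (PySem.List.enumerate (lines.drop k) (k : Int))
       if start = -1 then none
       else
         let cur := pvLevelA (PySem.List.pyGetD lines start [])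
         some [("start", start),
               ("end", pvFindEndA lines cur (PySem.List.pyRange (start + 1) (lines.length : Int)))]) =
      pvScanB (lines.length : Int) h (pvHeads (PySem.List.enumerate (lines.drop k) (k : Int))) := by
  intro n
  induction n with
  | zero =>
    intro k hn hk
    have hk' : k = lines.length := by omega
    subst hk'
    simp [List.drop_length, PySem.List.enumerate_nil, pvFindStartA, pvHeads, pvScanB]
  | succ n ih =>
    intro k hn hk
    have hklt : k < lines.length := by omega
    have hd : lines.drop k = lines[k] :: lines.drop (k + 1) := List.drop_eq_getElem_cons hklt
    have hget : PySem.List.pyGetD lines (k : Int) [] = lines[k] := by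
      rw [PySem.List.pyGetD_natCast, List.getD_eq_getElem _ _ hklt]
    have hcast : ((k : Int) + 1) = ((k + 1 : Nat) : Int) := by push_cast; ring
    have ih' := ih (k + 1) (by omega) (by omega)
    rw [hd, PySem.List.enumerate_cons]
    by_cases hH : pvIsHead lines[k]
    · by_cases hIn : PySem.Chars.isIn h lines[k]
      · have hne : (k : Int) ≠ -1 := by omega
        have hend := pvEnd_eq lines (pvLevelA lines[k]) n (k + 1) (by omega) (by omega)
        simp only [pvFindStartA, pvHeads, pvScanB, hH, hIn, Bool.and_self, if_true, hne,
          hget, pvCountHash_eq_levelA]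
        simp only [if_false]
        rw [hcast, hend]
      · simp only [pvFindStartA, pvHeads, pvScanB, hH, hIn, Bool.and_false, if_false,
          Bool.false_eq_true, if_true, hcast]
        exact ih'
    · have hA : (pvIsHead lines[k] && PySem.Chars.isIn h lines[k]) = false := by
        simp [hH]
      simp only [pvFindStartA, pvHeads, hA, hH, Bool.false_eq_true, if_false, hcast]
      exact ih'

-- ===== VERDICT (by name: the statement is the Claim_ definition above) =====
theorem find_section_indices_spec : Claim_equal_find_section_indices := by
  intro markdown heading _
  unfold Spec_find_section_indices find_section_indices find_section_indices_alt
  have := pvMain_eq (PySem.Chars.splitOn markdown.toList ['\n']) heading.toList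
    (PySem.Chars.splitOn markdown.toList ['\n']).length 0 (by omega) (by omega)
  simpa using this
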